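-- pv_equiv track=rewrite | github.com/nikhil-codes-hub/ad_revamped | frontend/streamlit_ui/app_core.py | filter_raw_paths
-- ===== SOURCE A (Python) =====
-- from typing import Optional, Dict, Any, List
--
-- def _path_ancestors(path: str) -> List[str]:
--     parts = path.split('/')
--     return ['/'.join(parts[:i]) for i in range(1, len(parts)) if parts[:i]]
--
-- def filter_raw_paths(raw_paths: List[str], previous_raw: Optional[List[str]] = None,
--                      previous_effective: Optional[List[str]] = None) -> List[str]:
--     """Remove auto-selected descendants when parent is newly chosen,
--     and remove auto-selected parents when all children are manually selected."""
--     unique_paths = list(dict.fromkeys(raw_paths or []))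
--     prev_selected = set(previous_raw or []) | set(previous_effective or [])
--     raw_set = set(unique_paths)
--
--     filtered = []
--     for path in unique_paths:
--         # Check if parent is selected
--         has_parent_selected = any(parent in raw_set for parent in _path_ancestors(path))
--         if has_parent_selected and path not in prev_selected:
--             continue  # Skip descendants implicitly checked via parent
--
--         # NEW: Check if this parent was auto-selected by the tree component
--         # When user selects all children, tree component auto-checks the parent
--         # We detect this by checking if:
--         # 1. This path has children (descendants) in the selection
--         # 2. This path was NOT in the previous selection (it's newly appeared)
--         # 3. At least one child was in the previous selection (user was selecting children)
--         if path not in prev_selected: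
--             has_children_selected = any(p.startswith(f"{path}/") for p in raw_set)
--             if has_children_selected:
--                 # Check if any child was previously selected (indicating user is selecting children, not parent)
--                 any_child_was_selected = any(p.startswith(f"{path}/") for p in prev_selected)
--                 if any_child_was_selected:
--                     # This parent was auto-checked by tree component, skip it
--                     continue
--
--         filtered.append(path)
--
--     return filtered
-- ===== SOURCE B (Python) =====
-- from typing import Optional, List
--
-- def _slash_prefixes(p: str) -> List[str]:
--     return [p[:j] for j, ch in enumerate(p) if ch == '/']
--
-- def filter_raw_paths(raw_paths: List[str], previous_raw: Optional[List[str]] = None,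
--                      previous_effective: Optional[List[str]] = None) -> List[str]:
--     unique_paths = list(dict.fromkeys(raw_paths or []))
--     prev_selected = set(previous_raw or []) | set(previous_effective or [])
--     raw_set = set(unique_paths)
--     # a path q has a selected/previously-selected descendant iff q is a slash-prefix
--     # of some member, so one pass builds both "has descendant" sets up front
--     anc_raw = {a for p in raw_set for a in _slash_prefixes(p)}
--     anc_prev = {a for p in prev_selected for a in _slash_prefixes(p)}
--     filtered = []
--     for path in unique_paths:
--         if path in prev_selected:
--             filtered.append(path)
--         elif any(a in raw_set for a in _slash_prefixes(path)):
--             continue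
--         elif path in anc_raw and path in anc_prev:
--             continue
--         else:
--             filtered.append(path)
--     return filtered
-- ===== Notes on version B (the rewrite author's own statement) =====
-- stated objective: faster
-- what changed: A rescans the whole selection with any(p.startswith(path+'/') ...) for every path (and recomputes split-based ancestors per path); B builds the slash-prefix ('has a selected descendant') sets for the current and previous selections once up front, turning each per-path descendant test into a single set lookup.
import Mathlib
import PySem

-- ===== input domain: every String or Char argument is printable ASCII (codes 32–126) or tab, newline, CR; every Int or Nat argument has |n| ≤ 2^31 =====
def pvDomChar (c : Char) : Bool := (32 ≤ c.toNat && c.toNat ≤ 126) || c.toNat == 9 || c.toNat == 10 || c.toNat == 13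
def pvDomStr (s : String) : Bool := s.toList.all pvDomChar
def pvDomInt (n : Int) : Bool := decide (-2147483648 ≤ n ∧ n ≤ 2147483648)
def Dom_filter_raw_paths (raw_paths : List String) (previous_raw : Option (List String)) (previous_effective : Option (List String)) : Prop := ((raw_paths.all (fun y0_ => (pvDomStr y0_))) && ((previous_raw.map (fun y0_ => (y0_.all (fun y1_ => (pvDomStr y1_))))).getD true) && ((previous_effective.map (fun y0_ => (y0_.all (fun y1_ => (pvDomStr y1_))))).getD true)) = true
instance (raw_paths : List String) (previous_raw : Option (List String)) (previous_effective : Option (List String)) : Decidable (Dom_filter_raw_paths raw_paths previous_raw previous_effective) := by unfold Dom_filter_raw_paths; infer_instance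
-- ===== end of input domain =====

-- B replaces A's per-path scans of the whole selection (any(p.startswith(path + "/") ...)) by
-- slash-prefix ("ancestor") sets built once up front; return values proved equal on all inputs.

-- ===== PORT A =====
-- ['/'.join(parts[:i]) for i in range(1, len(parts)) if parts[:i]]
def pv_anc_comp (parts : List String) : List String :=
  ((PySem.List.pyRange 1 (PySem.List.len parts)).filter
      (fun i => !(PySem.List.slice parts none (some i)).isEmpty)).map
    (fun i => PySem.Str.join "/" (PySem.List.slice parts none (some i)))

-- _path_ancestors: parts = path.split('/') (sep '/' ≠ '', so the Chars.splitOn form is exact)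
def pv_path_ancestors (path : String) : List String :=
  pv_anc_comp ((PySem.Chars.splitOn path.toList ['/']).map String.ofList)

def filter_raw_paths (raw_paths : List String) (previous_raw : Option (List String)) (previous_effective : Option (List String)) : List String :=
  let unique_paths := PySem.List.dedup raw_paths
  let prev_selected : PySem.Set String :=
    PySem.Set.union (PySem.Set.ofList (previous_raw.getD [])) (PySem.Set.ofList (previous_effective.getD []))
  let raw_set : PySem.Set String := PySem.Set.ofList unique_paths
  unique_paths.foldl (fun filtered path =>
    let has_parent_selected := (pv_path_ancestors path).any (fun parent => PySem.Set.contains raw_set parent)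
    if has_parent_selected && !(PySem.Set.contains prev_selected path) then
      filtered
    else if !(PySem.Set.contains prev_selected path) then
      -- f"{path}/" built exactly on the char lists (Lean's String.append is kernel-opaque)
      let has_children_selected := raw_set.any (fun p => PySem.Str.startswith p (String.ofList (path.toList ++ ['/'])))
      if has_children_selected then
        let any_child_was_selected := prev_selected.any (fun p => PySem.Str.startswith p (String.ofList (path.toList ++ ['/'])))
        if any_child_was_selected then filtered else filtered ++ [path]
      else filtered ++ [path]
    else filtered ++ [path]) []

-- ===== PORT B =====
-- _slash_prefixes: [p[:j] for j, ch in enumerate(p) if ch == '/']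
def pv_slash_prefixes (p : String) : List String :=
  (PySem.List.enumerate p.toList 0).filterMap
    (fun jc => if jc.2 = '/' then some (PySem.Str.slice p none (some jc.1)) else none)

def filter_raw_paths_alt (raw_paths : List String) (previous_raw : Option (List String)) (previous_effective : Option (List String)) : List String :=
  let unique_paths := PySem.List.dedup raw_paths
  let prev_selected : PySem.Set String :=
    PySem.Set.union (PySem.Set.ofList (previous_raw.getD [])) (PySem.Set.ofList (previous_effective.getD []))
  let raw_set : PySem.Set String := PySem.Set.ofList unique_paths
  let anc_raw : PySem.Set String := PySem.Set.ofList (raw_set.flatMap pv_slash_prefixes)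
  let anc_prev : PySem.Set String := PySem.Set.ofList (prev_selected.flatMap pv_slash_prefixes)
  unique_paths.foldl (fun filtered path =>
    if PySem.Set.contains prev_selected path then filtered ++ [path]
    else if (pv_slash_prefixes path).any (fun a => PySem.Set.contains raw_set a) then filtered
    else if PySem.Set.contains anc_raw path && PySem.Set.contains anc_prev path then filtered
    else filtered ++ [path]) []

-- ===== PRECONDITION & SPEC =====
def Spec_filter_raw_paths (raw_paths : List String) (previous_raw : Option (List String)) (previous_effective : Option (List String)) (out : List String) : Prop := out = filter_raw_paths_alt raw_paths previous_raw previous_effective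
instance (raw_paths : List String) (previous_raw : Option (List String)) (previous_effective : Option (List String)) (out : List String) : Decidable (Spec_filter_raw_paths raw_paths previous_raw previous_effective out) := by unfold Spec_filter_raw_paths; infer_instance

-- ===== CLAIM (what is proved, stated in full; the proofs are below) =====
def Claim_equal_filter_raw_paths : Prop := ∀ (raw_paths : List String) (previous_raw : Option (List String)) (previous_effective : Option (List String)), Dom_filter_raw_paths raw_paths previous_raw previous_effective → Spec_filter_raw_paths raw_paths previous_raw previous_effective (filter_raw_paths raw_paths previous_raw previous_effective)

-- ===== LEMMAS AND PROOFS =====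

-- the common structural value: the proper '/'-prefixes of cs, by slash position, in order
def pvPrefC (cs : List Char) : List (List Char) :=
  match cs with
  | [] => []
  | c :: cs => (if c = '/' then [[]] else []) ++ (pvPrefC cs).map (c :: ·)

-- A's comprehension, reduced to char lists and Mathlib's splitOnP
def pvAncC (cs : List Char) : List (List Char) :=
  (List.range' 1 ((List.splitOnP (fun x => x == '/') cs).length - 1)).map
    (fun i => PySem.Chars.join ['/'] ((List.splitOnP (fun x => x == '/') cs).take i))

-- splitOn.go computes splitOnP once the fuel suffices
theorem pv_go_eq (fuel : Nat) (l cur : List Char) (acc : List (List Char))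
    (h : l.length ≤ fuel) :
    PySem.Chars.splitOn.go ['/'] fuel l cur acc
      = acc.reverse ++ (List.splitOnP (fun x => x == '/') l).modifyHead (cur.reverse ++ ·) := by
  induction fuel generalizing l cur acc with
  | zero =>
    have : l = [] := by simpa using h
    subst this
    simp [PySem.Chars.splitOn.go, List.splitOnP_nil]
  | succ fuel ih =>
    cases l with
    | nil => simp [PySem.Chars.splitOn.go, List.splitOnP_nil]
    | cons c rest =>
      rw [PySem.Chars.splitOn.go.eq_def]
      simp only [List.isPrefixOf]
      by_cases hc : c = '/'
      · subst hc
        simp only [beq_self_eq_true, Bool.true_and, if_pos, List.drop_succ_cons, List.length_cons,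
          List.length_nil, List.drop_zero]
        rw [ih rest [] _ (by simpa using Nat.le_of_succ_le_succ (by simpa using h))]
        rw [List.splitOnP_cons]
        simp only [beq_self_eq_true, if_pos, List.modifyHead]
        cases List.splitOnP (fun x => x == '/') rest <;> simp [List.modifyHead]
      · rw [if_neg (by simp [Ne.symm hc])]
        rw [ih rest (c :: cur) acc (by simpa using Nat.le_of_succ_le_succ (by simpa using h))]
        rw [List.splitOnP_cons]
        simp only [hc, beq_iff_eq]
        obtain ⟨q, Q, hq⟩ := List.exists_cons_of_ne_nil (List.splitOnP_ne_nil (fun x => x == '/') rest)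
        rw [hq]
        simp [List.modifyHead]

theorem pv_splitOn_eq (cs : List Char) :
    PySem.Chars.splitOn cs ['/'] = List.splitOnP (fun x => x == '/') cs := by
  rw [PySem.Chars.splitOn, pv_go_eq _ _ _ _ (by omega)]
  obtain ⟨q, Q, hq⟩ := List.exists_cons_of_ne_nil (List.splitOnP_ne_nil (fun x => x == '/') cs)
  rw [hq]; simp [List.modifyHead]

theorem pv_join_cons_head (c : Char) (q : List Char) (T : List (List Char)) :
    PySem.Chars.join ['/'] ((c :: q) :: T) = c :: PySem.Chars.join ['/'] (q :: T) := by
  cases T with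
  | nil => simp [PySem.Chars.join_singleton]
  | cons t T' => rw [PySem.Chars.join_cons_cons, PySem.Chars.join_cons_cons]; simp

theorem pv_join_nil_cons (q : List Char) (T : List (List Char)) :
    PySem.Chars.join ['/'] ([] :: q :: T) = '/' :: PySem.Chars.join ['/'] (q :: T) := by
  rw [PySem.Chars.join_cons_cons]; simp

theorem pv_ancC_eq_prefC (cs : List Char) : pvAncC cs = pvPrefC cs := by
  induction cs with
  | nil => simp [pvAncC, pvPrefC, List.splitOnP_nil]
  | cons c cs ih =>
    obtain ⟨q, Q, hq⟩ := List.exists_cons_of_ne_nil (List.splitOnP_ne_nil (fun x => x == '/') cs)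
    have hlen : (List.splitOnP (fun x => x == '/') cs).length = Q.length + 1 := by
      rw [hq]; simp
    by_cases hc : c = '/'
    · subst hc
      simp only [pvAncC, List.splitOnP_cons, beq_self_eq_true, if_pos, List.length_cons, hlen]
      simp only [Nat.add_sub_cancel]
      rw [show Q.length + 1 = Q.length + 1 from rfl, List.range'_succ]
      simp only [List.map_cons, List.take_succ_cons, List.take_zero,
        PySem.Chars.join_singleton]
      have hr2 : List.range' 2 Q.length = (List.range' 1 Q.length).map (fun j => 1 + j) := by
        rw [List.map_add_range']
      rw [hr2, List.map_map]
      have hmap : ∀ i ∈ List.range' 1 Q.length,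
          ((fun i => PySem.Chars.join ['/'] (([] :: List.splitOnP (fun x => x == '/') cs).take i)) ∘ (fun j => 1 + j)) i
            = (fun x => '/' :: x) (PySem.Chars.join ['/'] ((List.splitOnP (fun x => x == '/') cs).take i)) := by
        intro i hi
        obtain ⟨k, hk, hik⟩ := List.mem_range'.1 hi
        have hi1 : 1 ≤ i := by omega
        obtain ⟨i', rfl⟩ := Nat.exists_eq_add_of_le hi1
        simp only [Function.comp_apply]
        rw [show (1 + (1 + i')) = (1 + i') + 1 from by omega]
        rw [List.take_succ_cons]
        rw [hq, show (1 + i') = i' + 1 from by omega, List.take_succ_cons]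
        exact pv_join_nil_cons _ _
      rw [List.map_congr_left hmap]
      rw [show (fun a => (fun x => '/' :: x) (PySem.Chars.join ['/'] ((List.splitOnP (fun x => x == '/') cs).take a)))
            = ((fun x => '/' :: x) ∘ (fun a => PySem.Chars.join ['/'] ((List.splitOnP (fun x => x == '/') cs).take a))) from rfl,
          ← List.map_map]
      have hAnc : (List.range' 1 Q.length).map
          (fun a => PySem.Chars.join ['/'] ((List.splitOnP (fun x => x == '/') cs).take a)) = pvAncC cs := by
        rw [pvAncC, hlen]
        norm_num
      rw [hAnc, ih]
      simp [pvPrefC]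
    · have hsplit : List.splitOnP (fun x => x == '/') (c :: cs)
          = (c :: q) :: Q := by
        rw [List.splitOnP_cons, if_neg (by simp [hc]), hq]
        rfl
      rw [pvAncC, hsplit]
      simp only [List.length_cons, Nat.add_sub_cancel]
      have hmap : ∀ i ∈ List.range' 1 Q.length,
          (fun i => PySem.Chars.join ['/'] (((c :: q) :: Q).take i)) i
            = (fun x => c :: x) (PySem.Chars.join ['/'] ((q :: Q).take i)) := by
        intro i hi
        obtain ⟨k, hk, hik⟩ := List.mem_range'.1 hi
        obtain ⟨i', rfl⟩ := Nat.exists_eq_add_of_le (show 1 ≤ i by omega)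
        simp only []
        rw [show (1 + i') = i' + 1 from by omega, List.take_succ_cons, List.take_succ_cons]
        exact pv_join_cons_head _ _ _
      rw [List.map_congr_left hmap]
      rw [show (fun i => (fun x => c :: x) (PySem.Chars.join ['/'] ((q :: Q).take i)))
            = ((fun x => c :: x) ∘ (fun i => PySem.Chars.join ['/'] ((q :: Q).take i))) from rfl,
          ← List.map_map]
      have hAnc : (List.range' 1 Q.length).map
          (fun i => PySem.Chars.join ['/'] ((q :: Q).take i)) = pvAncC cs := by
        rw [pvAncC, hlen, ← hq]
        norm_num
      rw [hAnc, ih]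
      simp [pvPrefC, hc]

theorem pv_pyRange_one (n : Nat) :
    PySem.List.pyRange 1 (n : Int) = (List.range' 1 (n - 1)).map (fun m => Int.ofNat m) := by
  match n with
  | 0 => decide
  | 1 => decide
  | (m+2) =>
    have h1 : ((m + 2 : Nat) : Int) = ((m + 1 : Nat) : Int) + 1 := by push_cast; ring
    rw [h1, PySem.List.pyRange_one_succ_right (by omega)]
    rw [pv_pyRange_one (m+1)]
    have : (m + 2 - 1) = (m + 1 - 1) + 1 := rfl
    rw [this, List.range'_concat]
    simp
    omega

theorem pv_str_slice_take (p : String) (n : Nat) :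
    PySem.Str.slice p none (some (n : Int)) = String.ofList (p.toList.take n) := by
  have h : (PySem.Str.slice p none (some (n : Int))).toList = p.toList.take n := by
    rw [PySem.Str.toList_slice, PySem.Chars.slice_eq_listSlice, PySem.List.slice_to_natCast]
  rw [← h, String.ofList_toList]

theorem pv_str_join_ofList (sep : List Char) (L : List (List Char)) :
    PySem.Str.join (String.ofList sep) (L.map String.ofList)
      = String.ofList (PySem.Chars.join sep L) := by
  rw [← String.ofList_toList (s := PySem.Str.join (String.ofList sep) (L.map String.ofList)),
    PySem.Str.toList_join]
  simp [String.toList_ofList, List.map_map, Function.comp_def]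

theorem pv_path_ancestors_eq (s : String) :
    pv_path_ancestors s = (pvAncC s.toList).map String.ofList := by
  unfold pv_path_ancestors pv_anc_comp pvAncC
  rw [pv_splitOn_eq]
  set P := List.splitOnP (fun x => x == '/') s.toList with hP
  have hPne : P ≠ [] := List.splitOnP_ne_nil _ _
  have hlen : PySem.List.len (P.map String.ofList) = ((P.map String.ofList).length : Int) := by
    simp [pysem]
  rw [hlen]
  simp only [List.length_map]
  rw [pv_pyRange_one]
  have hfilter : ((List.range' 1 (P.length - 1)).map (fun m => Int.ofNat m)).filter
      (fun i => !(PySem.List.slice (P.map String.ofList) none (some i)).isEmpty)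
      = (List.range' 1 (P.length - 1)).map (fun m => Int.ofNat m) := by
    apply List.filter_eq_self.mpr
    intro i hi
    obtain ⟨m, hm, rfl⟩ := List.mem_map.1 hi
    obtain ⟨k, hk, hmk⟩ := List.mem_range'.1 hm
    rw [Int.ofNat_eq_natCast, PySem.List.slice_to_natCast]
    have hm0 : m ≠ 0 := by omega
    have hPm : List.map String.ofList P ≠ [] := by simpa using hPne
    simp [List.take_eq_nil_iff, hm0, hPm]
  rw [hfilter, List.map_map, List.map_map]
  apply List.map_congr_left
  intro m hm
  simp only [Function.comp_apply]
  rw [Int.ofNat_eq_natCast, PySem.List.slice_to_natCast, ← List.map_take]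
  rw [show ("/" : String) = String.ofList ['/'] from rfl]
  exact pv_str_join_ofList ['/'] (P.take m)

theorem pv_enum_pref (p : String) : ∀ (cs pre : List Char), p.toList = pre ++ cs →
    (PySem.List.enumerate cs (pre.length : Int)).filterMap
      (fun jc => if jc.2 = '/' then some (PySem.Str.slice p none (some jc.1)) else none)
    = ((pvPrefC cs).map (pre ++ ·)).map String.ofList := by
  intro cs
  induction cs with
  | nil => intro pre h; simp [PySem.List.enumerate_nil, pvPrefC]
  | cons c cs ih =>
    intro pre h
    rw [PySem.List.enumerate_cons, List.filterMap_cons]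
    have step : ((pre.length : Int) + 1) = ((pre ++ [c]).length : Int) := by simp
    have hrest := ih (pre ++ [c]) (by simpa using h)
    rw [step, hrest]
    by_cases hc : c = '/'
    · subst hc
      simp only [if_pos rfl]
      have hsl : PySem.Str.slice p none (some (pre.length : Int)) = String.ofList pre := by
        rw [pv_str_slice_take, h, List.take_left]
      rw [hsl]
      simp [pvPrefC, List.map_map, Function.comp_def, List.append_assoc]
    · simp only [hc, if_neg, ite_false]
      simp [pvPrefC, hc, List.map_map, Function.comp_def, List.append_assoc]

theorem pv_slash_prefixes_eq (s : String) :
    pv_slash_prefixes s = (pvPrefC s.toList).map String.ofList := by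
  have := pv_enum_pref s s.toList [] (by simp)
  simpa [pv_slash_prefixes] using this

-- K1: the two helper functions return the same list
theorem pv_helpers_eq (s : String) : pv_path_ancestors s = pv_slash_prefixes s := by
  rw [pv_path_ancestors_eq, pv_slash_prefixes_eq, pv_ancC_eq_prefC]

theorem pv_mem_prefC (cs x : List Char) : x ∈ pvPrefC cs ↔ (x ++ ['/']) <+: cs := by
  induction cs generalizing x with
  | nil =>
    simp only [pvPrefC, List.not_mem_nil, false_iff]
    intro h
    have := h.length_le
    simp at this
  | cons c cs ih =>
    cases x with
    | nil =>
      simp only [pvPrefC, List.mem_append, List.nil_append]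
      constructor
      · rintro (h | h)
        · split at h
          · rename_i hc; subst hc
            exact ⟨cs, rfl⟩
          · simp at h
        · obtain ⟨y, _, hy⟩ := List.mem_map.1 h
          exact absurd hy.symm (by simp)
      · intro h
        rw [List.cons_prefix_cons] at h
        left
        simp [h.1.symm]
    | cons d x' =>
      simp only [pvPrefC, List.mem_append, List.cons_append, List.cons_prefix_cons]
      constructor
      · rintro (h | h)
        · split at h <;> simp at h
        · obtain ⟨y, hy, heq⟩ := List.mem_map.1 h
          cases heq
          exact ⟨rfl, (ih x').1 hy⟩
      · rintro ⟨rfl, h⟩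
        right
        exact List.mem_map.2 ⟨x', (ih x').2 h, rfl⟩

-- K2: membership in the precomputed ancestor set = A's startswith scan over the same list
theorem pv_anc_contains (S : List String) (path : String) :
    PySem.Set.contains (PySem.Set.ofList (S.flatMap pv_slash_prefixes)) path
      = S.any (fun p => PySem.Str.startswith p (String.ofList (path.toList ++ ['/']))) := by
  rw [Bool.eq_iff_iff, PySem.Set.contains_iff, PySem.Set.mem_ofList, List.mem_flatMap,
    List.any_eq_true]
  constructor
  · rintro ⟨p, hp, hmem⟩
    refine ⟨p, hp, ?_⟩
    rw [pv_slash_prefixes_eq] at hmem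
    obtain ⟨x, hx, rfl⟩ := List.mem_map.1 hmem
    rw [PySem.Str.startswith_eq, PySem.Chars.startswith_iff]
    have hpre := (pv_mem_prefC _ _).1 hx
    simpa [String.toList_ofList] using hpre
  · rintro ⟨p, hp, hsw⟩
    refine ⟨p, hp, ?_⟩
    rw [pv_slash_prefixes_eq]
    rw [PySem.Str.startswith_eq, PySem.Chars.startswith_iff, String.toList_ofList] at hsw
    refine List.mem_map.2 ⟨path.toList, (pv_mem_prefC _ _).2 hsw, ?_⟩
    exact String.ofList_toList

theorem pv_main (raw_paths : List String) (previous_raw previous_effective : Option (List String)) :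
    filter_raw_paths raw_paths previous_raw previous_effective
      = filter_raw_paths_alt raw_paths previous_raw previous_effective := by
  simp only [filter_raw_paths, filter_raw_paths_alt]
  apply PySem.List.foldl_congr_mem
  intro filtered path _
  rw [pv_helpers_eq, pv_anc_contains, pv_anc_contains]
  cases hprev : PySem.Set.contains
      (PySem.Set.union (PySem.Set.ofList (previous_raw.getD [])) (PySem.Set.ofList (previous_effective.getD []))) path <;>
    cases hp : (pv_slash_prefixes path).any
        (fun a => PySem.Set.contains (PySem.Set.ofList (PySem.List.dedup raw_paths)) a) <;>
      cases hc : (PySem.Set.ofList (PySem.List.dedup raw_paths)).any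
          (fun p => PySem.Str.startswith p (String.ofList (path.toList ++ ['/']))) <;>
        cases ha : (PySem.Set.union (PySem.Set.ofList (previous_raw.getD []))
            (PySem.Set.ofList (previous_effective.getD []))).any
            (fun p => PySem.Str.startswith p (String.ofList (path.toList ++ ['/']))) <;>
          simp [hprev, hp, hc, ha]

-- ===== VERDICT (by name: the statement is the Claim_ definition above) =====
theorem filter_raw_paths_spec : Claim_equal_filter_raw_paths := by
  intro raw_paths previous_raw previous_effective _
  unfold Spec_filter_raw_paths
  exact pv_main raw_paths previous_raw previous_effective
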